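-- pv_equiv track=rewrite | github.com/baday19/project-specific_code_completion | utils.py | split_to_blocks1
-- ===== SOURCE A (Python) =====
-- def split_to_blocks1(code):
--     codelines = code.splitlines()
--     SPLIT_MARK = '@split mark@'
--     pre_is_comment = False
--     process_lines = []
--     for line_no, line in enumerate(codelines):
--         curr = line.strip()
--         if curr == '':
--             if len(process_lines) !=0 and process_lines[-1] != SPLIT_MARK:
--                 process_lines.append(SPLIT_MARK)
--         elif curr.startswith('#'):
--             if pre_is_comment:
--                 process_lines.append((line, line_no))
--             else:
--                 if len(process_lines) !=0 and process_lines[-1] != SPLIT_MARK: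
--                     process_lines.append(SPLIT_MARK)
--                 process_lines.append((line, line_no))
--                 pre_is_comment = True
--         else:
--             process_lines.append((line, line_no))
--             pre_is_comment = False
--
--     subchunk_list = []
--     temp_subchunk = []
--     for i in process_lines:
--         if i != SPLIT_MARK:
--             temp_subchunk.append(i)
--         else:
--             if len(temp_subchunk) != 0:
--                 subchunk_list.append(temp_subchunk)
--             temp_subchunk = []
--
--     if len(temp_subchunk) != 0:
--         subchunk_list.append(temp_subchunk)
--
--     return subchunk_list
-- ===== SOURCE B (Python) =====
-- def split_to_blocks1(code):
--     blocks = []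
--     current = []
--     pre_is_comment = False
--     for line_no, line in enumerate(code.splitlines()):
--         curr = line.strip()
--         if curr == '':
--             if current:
--                 blocks.append(current)
--                 current = []
--         elif curr.startswith('#'):
--             if not pre_is_comment:
--                 if current:
--                     blocks.append(current)
--                     current = []
--                 pre_is_comment = True
--             current.append((line, line_no))
--         else:
--             current.append((line, line_no))
--             pre_is_comment = False
--     if current:
--         blocks.append(current)
--     return blocks
-- ===== Notes on version B (the rewrite author's own statement) =====
-- stated objective: simpler
-- what changed: Replaces A's two-pass design (insert a SPLIT_MARK sentinel into an intermediate list, then split that list on the sentinel) with a single pass that keeps a current block and flushes it into the result at each split point.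
import Mathlib
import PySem

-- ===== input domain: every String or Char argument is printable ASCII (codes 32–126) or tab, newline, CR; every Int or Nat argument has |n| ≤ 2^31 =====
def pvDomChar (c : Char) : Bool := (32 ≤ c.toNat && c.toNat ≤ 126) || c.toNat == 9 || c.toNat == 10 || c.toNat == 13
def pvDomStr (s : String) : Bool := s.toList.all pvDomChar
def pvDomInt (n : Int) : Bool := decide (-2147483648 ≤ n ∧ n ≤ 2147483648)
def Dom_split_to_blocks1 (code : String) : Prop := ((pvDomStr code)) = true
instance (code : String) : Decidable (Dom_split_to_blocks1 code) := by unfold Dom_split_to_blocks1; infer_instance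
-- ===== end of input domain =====

-- B fuses A's two passes (mark insertion, then splitting on the SPLIT_MARK sentinel) into one
-- pass that flushes a `current` block directly; objective: simpler.

-- ===== PORT A =====
-- process_lines holds tuples or the SPLIT_MARK sentinel string; since the sentinel is never
-- equal to a tuple, we port its elements as Option (String × Int) with none = SPLIT_MARK.
-- First loop: `for line_no, line in enumerate(codelines)` with state (pre_is_comment, process_lines).
def pvPass1A (lines : List String) (n : Int) (pre : Bool)
    (pl : List (Option (String × Int))) : List (Option (String × Int)) :=
  match lines with
  | [] => pl
  | line :: rest =>
    let curr := PySem.Str.strip line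
    if curr = "" then
      pvPass1A rest (n + 1) pre
        (if pl ≠ [] ∧ pl.getLast? ≠ some none then pl ++ [none] else pl)
    else if PySem.Str.startswith curr "#" then
      if pre then
        pvPass1A rest (n + 1) pre (pl ++ [some (line, n)])
      else
        pvPass1A rest (n + 1) true
          ((if pl ≠ [] ∧ pl.getLast? ≠ some none then pl ++ [none] else pl) ++ [some (line, n)])
    else
      pvPass1A rest (n + 1) false (pl ++ [some (line, n)])

-- Second loop over process_lines plus the final `if len(temp_subchunk) != 0` flush.
def pvPass2A (items : List (Option (String × Int)))
    (subs : List (List (String × Int))) (temp : List (String × Int)) :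
    List (List (String × Int)) :=
  match items with
  | [] => if temp ≠ [] then subs ++ [temp] else subs
  | some x :: rest => pvPass2A rest subs (temp ++ [x])
  | none :: rest => pvPass2A rest (if temp ≠ [] then subs ++ [temp] else subs) []

def split_to_blocks1 (code : String) : List (List (String × Int)) :=
  pvPass2A (pvPass1A (PySem.Str.splitlines code) 0 false []) [] []

-- ===== PORT B =====
def pvGoB (lines : List String) (n : Int) (pre : Bool)
    (blocks : List (List (String × Int))) (cur : List (String × Int)) :
    List (List (String × Int)) :=
  match lines with
  | [] => if cur ≠ [] then blocks ++ [cur] else blocks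
  | line :: rest =>
    let curr := PySem.Str.strip line
    if curr = "" then
      if cur ≠ [] then pvGoB rest (n + 1) pre (blocks ++ [cur]) []
      else pvGoB rest (n + 1) pre blocks cur
    else if PySem.Str.startswith curr "#" then
      if pre then pvGoB rest (n + 1) pre blocks (cur ++ [(line, n)])
      else if cur ≠ [] then pvGoB rest (n + 1) true (blocks ++ [cur]) ([] ++ [(line, n)])
      else pvGoB rest (n + 1) true blocks (cur ++ [(line, n)])
    else
      pvGoB rest (n + 1) false blocks (cur ++ [(line, n)])

def split_to_blocks1_alt (code : String) : List (List (String × Int)) :=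
  pvGoB (PySem.Str.splitlines code) 0 false [] []

-- ===== PRECONDITION & SPEC =====
def Spec_split_to_blocks1 (code : String) (out : List (List (String × Int))) : Prop := out = split_to_blocks1_alt code
instance (code : String) (out : List (List (String × Int))) : Decidable (Spec_split_to_blocks1 code out) := by unfold Spec_split_to_blocks1; infer_instance

-- ===== CLAIM (what is proved, stated in full; the proofs are below) =====
def Claim_equal_split_to_blocks1 : Prop := ∀ (code : String), Dom_split_to_blocks1 code → Spec_split_to_blocks1 code (split_to_blocks1 code)

-- ===== LEMMAS AND PROOFS =====

-- the items pass 1 appends for the remaining lines, given only the one bit of the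
-- accumulated list that pass 1 inspects: "pl ≠ [] and its last element is not the mark"
def pvGen (lines : List String) (n : Int) (pre : Bool) (flag : Bool) :
    List (Option (String × Int)) :=
  match lines with
  | [] => []
  | line :: rest =>
    let curr := PySem.Str.strip line
    if curr = "" then
      (if flag then [none] else []) ++ pvGen rest (n + 1) pre false
    else if PySem.Str.startswith curr "#" then
      if pre then some (line, n) :: pvGen rest (n + 1) pre true
      else (if flag then [none] else []) ++ some (line, n) :: pvGen rest (n + 1) true true
    else
      some (line, n) :: pvGen rest (n + 1) false true

def pvFlag (pl : List (Option (String × Int))) : Bool :=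
  decide (pl ≠ [] ∧ pl.getLast? ≠ some none)

theorem pvFlag_concat (pl : List (Option (String × Int))) (x : Option (String × Int)) :
    pvFlag (pl ++ [x]) = (x ≠ none : Bool) := by
  cases x <;> simp [pvFlag]

theorem pvFlag_nil : pvFlag [] = false := by simp [pvFlag]

theorem pvPass1A_eq_gen (lines : List String) (n : Int) (pre : Bool)
    (pl : List (Option (String × Int))) :
    pvPass1A lines n pre pl = pl ++ pvGen lines n pre (pvFlag pl) := by
  induction lines generalizing n pre pl with
  | nil => simp [pvPass1A, pvGen]
  | cons line rest ih =>
    rw [pvPass1A, pvGen]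
    by_cases h1 : PySem.Str.strip line = ""
    · simp only [h1, reduceIte]
      by_cases h2 : pl ≠ [] ∧ pl.getLast? ≠ some none
      · rw [if_pos h2, ih, pvFlag_concat]
        have hf : pvFlag pl = true := by simp [pvFlag, h2]
        rw [hf]
        simp
      · rw [if_neg h2, ih]
        have hf : pvFlag pl = false := by simp only [pvFlag, decide_eq_false_iff_not]; exact h2
        rw [hf]
        simp
    · by_cases h3 : PySem.Str.startswith (PySem.Str.strip line) "#" = true
      · by_cases h4 : pre = true
        · simp only [h1, h3, h4, reduceIte]
          rw [ih, pvFlag_concat]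
          simp
        · have h4' : pre = false := by simpa using h4
          simp only [h1, h3, h4', reduceIte, Bool.false_eq_true]
          by_cases h2 : pl ≠ [] ∧ pl.getLast? ≠ some none
          · rw [if_pos h2, ih, pvFlag_concat]
            have hf : pvFlag pl = true := by simp [pvFlag, h2]
            rw [hf]
            simp
          · rw [if_neg h2, ih, pvFlag_concat]
            have hf : pvFlag pl = false := by simp only [pvFlag, decide_eq_false_iff_not]; exact h2
            rw [hf]
            simp
      · simp only [h1, h3, reduceIte, Bool.false_eq_true]
        rw [ih, pvFlag_concat]
        simp

theorem pvPass2_gen_eq_goB (lines : List String) (n : Int) (pre : Bool)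
    (blocks : List (List (String × Int))) (cur : List (String × Int)) :
    pvPass2A (pvGen lines n pre (decide (cur ≠ []))) blocks cur = pvGoB lines n pre blocks cur := by
  induction lines generalizing n pre blocks cur with
  | nil => simp [pvGen, pvPass2A, pvGoB]
  | cons line rest ih =>
    rw [pvGen, pvGoB]
    by_cases h1 : PySem.Str.strip line = ""
    · simp only [h1, reduceIte]
      by_cases hc : cur = []
      · subst hc
        simpa using ih (n + 1) pre blocks []
      · simp only [hc, ne_eq, not_false_eq_true, decide_true, reduceIte,
          List.singleton_append, pvPass2A]
        simpa using ih (n + 1) pre (blocks ++ [cur]) []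
    · by_cases h3 : PySem.Str.startswith (PySem.Str.strip line) "#" = true
      · by_cases h4 : pre = true
        · simp only [h1, h3, h4, reduceIte, pvPass2A]
          have := ih (n + 1) true blocks (cur ++ [(line, n)])
          simpa using this
        · have h4' : pre = false := by simpa using h4
          simp only [h1, h3, h4', reduceIte, Bool.false_eq_true]
          by_cases hc : cur = []
          · subst hc
            simp only [ne_eq, not_true_eq_false, decide_false, Bool.false_eq_true, reduceIte,
              List.nil_append, pvPass2A]
            have := ih (n + 1) true blocks ([] ++ [(line, n)])
            simpa using this
          · simp only [hc, ne_eq, not_false_eq_true, decide_true, reduceIte,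
              List.singleton_append, pvPass2A]
            have := ih (n + 1) true (blocks ++ [cur]) ([] ++ [(line, n)])
            simpa using this
      · simp only [h1, h3, reduceIte, Bool.false_eq_true, pvPass2A]
        have := ih (n + 1) false blocks (cur ++ [(line, n)])
        simpa using this

-- ===== VERDICT (by name: the statement is the Claim_ definition above) =====
theorem split_to_blocks1_spec : Claim_equal_split_to_blocks1 := by
  intro code _
  unfold Spec_split_to_blocks1 split_to_blocks1 split_to_blocks1_alt
  rw [pvPass1A_eq_gen, pvFlag_nil]
  simpa using pvPass2_gen_eq_goB (PySem.Str.splitlines code) 0 false [] []
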